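-- pv_equiv track=rewrite | github.com/remowxdx/AoC-2021 | aoc14.py | template_and_rules
-- ===== SOURCE A (Python) =====
-- def template_and_rules(lines):
--     template = list(lines[0])
--
--     rules = {}
--     skip = True
--     for line in lines:
--         if skip:
--             if len(line) == 0:
--                 skip = False
--             continue
--
--         pair, insertion = line.split(' -> ')
--         rules[pair] = insertion
--
--     return template, rules
-- ===== SOURCE B (Python) =====
-- def template_and_rules(lines):
--     template = list(lines[0])
--     rules = {}
--     if '' in lines:
--         # walk backwards, collecting rule lines until the blank separator
--         items = []
--         for line in reversed(lines):
--             if line == '':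
--                 break
--             items.append(line.split(' -> '))
--         rules = dict(reversed(items))
--     return template, rules
-- ===== Notes on version B (the rewrite author's own statement) =====
-- stated objective: alternative
-- what changed: Instead of A's forward walk with a skip flag, B scans the lines BACKWARDS collecting rule lines until it hits the blank separator, then builds the dict from the reversed collection; the forward flag state disappears.
import Mathlib
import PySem

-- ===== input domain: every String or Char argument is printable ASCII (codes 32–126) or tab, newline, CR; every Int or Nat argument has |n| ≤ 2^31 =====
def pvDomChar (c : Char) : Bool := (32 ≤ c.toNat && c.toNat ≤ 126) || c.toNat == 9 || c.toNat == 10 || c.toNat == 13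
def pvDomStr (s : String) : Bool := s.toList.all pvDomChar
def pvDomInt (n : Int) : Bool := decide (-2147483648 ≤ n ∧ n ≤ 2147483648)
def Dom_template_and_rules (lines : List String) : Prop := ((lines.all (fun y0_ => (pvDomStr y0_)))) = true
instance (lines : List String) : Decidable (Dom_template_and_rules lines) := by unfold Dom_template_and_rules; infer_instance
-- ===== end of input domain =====

-- B replaces A's forward skip-flag walk by a BACKWARD scan that collects rule lines until the
-- blank separator and builds the dict from the reversed collection; objective: alternative.
-- Equivalence is about the return value; neither program mutates its argument.

-- ===== PORT A =====
-- loop body of A's single for-loop (state: rules dict × skip flag)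
def pvAStep (st : PySem.Dict String String × Bool) (line : String) :
    PySem.Dict String String × Bool :=
  if st.2 then
    if PySem.Str.len line = 0 then (st.1, false) else st
  else
    match PySem.Str.split? line " -> " with
    | some [pair, insertion] => (st.1.insert pair insertion, st.2)
    | _ => st  -- Python raises ValueError here (unpack); excluded by Pre_

def template_and_rules (lines : List String) : List String × (List (String × String)) :=
  let template := (PySem.List.pyGetD lines 0 "").toList.map (fun c => String.ofList [c])
  let st := lines.foldl pvAStep (PySem.Dict.empty, true)
  (template, st.1.items)

-- ===== PORT B =====
-- B's backward for-loop with break: walks the REVERSED lines, collecting until the blank line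
def pvCollect : List String → List String
  | [] => []
  | l :: ls => if l = "" then [] else l :: pvCollect ls

-- body of B's dict(...) construction over the reversed collection
def pvBStep (d : PySem.Dict String String) (line : String) : PySem.Dict String String :=
  match PySem.Str.split? line " -> " with
  | some [pair, insertion] => d.insert pair insertion
  | _ => d  -- Python's dict(...) raises ValueError here; excluded by Pre_

def template_and_rules_alt (lines : List String) : List String × (List (String × String)) :=
  let template := (PySem.List.pyGetD lines 0 "").toList.map (fun c => String.ofList [c])
  let rules :=
    if lines.contains "" then
      ((pvCollect lines.reverse).reverse.foldl pvBStep PySem.Dict.empty)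
    else (PySem.Dict.empty : PySem.Dict String String)
  (template, rules.items)

-- ===== PRECONDITION & SPEC =====
-- Pre_ excludes exactly the inputs on which Python A raises: the empty list (IndexError on
-- lines[0]) and inputs where some line after the first blank line does not split on ' -> '
-- into exactly two pieces (ValueError on unpacking).
def Pre_template_and_rules (lines : List String) : Prop :=
  lines ≠ [] ∧
  ∀ i ∈ List.range lines.length,
    (∃ j ∈ List.range i, lines.getD j "x" = "") →
    ((PySem.Str.split? (lines.getD i "") " -> ").getD []).length = 2
instance (lines : List String) : Decidable (Pre_template_and_rules lines) := by
  unfold Pre_template_and_rules; infer_instance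

def pvWitness_template_and_rules : List String := ["NNCB", "", "CH -> B", "HH -> N", "CH -> C"]

def Spec_template_and_rules (lines : List String) (out : List String × (List (String × String))) : Prop := out = template_and_rules_alt lines
instance (lines : List String) (out : List String × (List (String × String))) : Decidable (Spec_template_and_rules lines out) := by unfold Spec_template_and_rules; infer_instance

-- ===== CLAIM (what is proved, stated in full; the proofs are below) =====
def Claim_equal_template_and_rules : Prop := ∀ (lines : List String), Dom_template_and_rules lines → Pre_template_and_rules lines → Spec_template_and_rules lines (template_and_rules lines)

-- ===== LEMMAS AND PROOFS =====

-- once skip is false, A's loop is exactly a fold of pvBStep (the flag stays false)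
theorem pvFoldFalse (ls : List String) (d : PySem.Dict String String) :
    ls.foldl pvAStep (d, false) = (ls.foldl pvBStep d, false) := by
  induction ls generalizing d with
  | nil => rfl
  | cons x ls ih =>
      simp only [List.foldl_cons]
      have hstep : pvAStep (d, false) x = (pvBStep d x, false) := by
        simp only [pvAStep, pvBStep]
        cases h : PySem.Str.split? x " -> " with
        | none => rfl
        | some l =>
            cases l with
            | nil => rfl
            | cons a t => cases t with
              | nil => rfl
              | cons b t' => cases t' <;> rfl
      rw [hstep, ih]

-- A's loop through the skip phase: first blank at position pre.length, rules from suf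
theorem pvFoldTrue (pre suf : List String) (hpre : "" ∉ pre) :
    (pre ++ "" :: suf).foldl pvAStep (PySem.Dict.empty, true) =
      (suf.foldl pvBStep PySem.Dict.empty, false) := by
  induction pre with
  | nil =>
      simp only [List.nil_append, List.foldl_cons]
      have hstep : pvAStep ((PySem.Dict.empty : PySem.Dict String String), true) "" =
          (PySem.Dict.empty, false) := rfl
      rw [hstep, pvFoldFalse]
  | cons x pre ih =>
      have hx : x ≠ "" := fun h => hpre (h ▸ List.mem_cons_self)
      simp only [List.cons_append, List.foldl_cons]
      have hstep : pvAStep ((PySem.Dict.empty : PySem.Dict String String), true) x =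
          (PySem.Dict.empty, true) := by
        simp [pvAStep, PySem.Str.len, hx]
      rw [hstep, ih (fun h => hpre (List.mem_cons_of_mem _ h))]

-- B's backward scan stops at the blank: pvCollect (suf.reverse ++ "" :: rest) = suf.reverse
theorem pvCollect_eq (xs ys : List String) (hxs : "" ∉ xs) :
    pvCollect (xs ++ "" :: ys) = xs := by
  induction xs with
  | nil => rfl
  | cons x xs ih =>
      have hx : x ≠ "" := fun h => hxs (h ▸ List.mem_cons_self)
      simp only [List.cons_append, pvCollect, if_neg hx]
      rw [ih (fun h => hxs (List.mem_cons_of_mem _ h))]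

-- with no blank line, A's skip flag never drops and the dict stays empty
theorem pvFoldAllSkip (lines : List String) (hmem : "" ∉ lines) :
    lines.foldl pvAStep (PySem.Dict.empty, true) = (PySem.Dict.empty, true) := by
  induction lines with
  | nil => rfl
  | cons x ls ih =>
      have hx : x ≠ "" := fun h => hmem (h ▸ List.mem_cons_self)
      simp only [List.foldl_cons]
      have hstep : pvAStep ((PySem.Dict.empty : PySem.Dict String String), true) x =
          (PySem.Dict.empty, true) := by
        simp [pvAStep, PySem.Str.len, hx]
      rw [hstep, ih (fun h => hmem (List.mem_cons_of_mem _ h))]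

-- under Pre_, no line after the first blank is itself blank
theorem pvNoBlankSuf (pre suf : List String)
    (hP : Pre_template_and_rules (pre ++ "" :: suf)) : "" ∉ suf := by
  intro hmem
  obtain ⟨k, hk, hkv⟩ := List.getElem_of_mem hmem
  have hlen : (pre ++ "" :: suf).length = pre.length + 1 + suf.length := by
    simp [List.length_append]; omega
  have hidx : (pre ++ "" :: suf).getD (pre.length + 1 + k) "" = "" := by
    have h1 : pre.length + 1 + k < (pre ++ "" :: suf).length := by omega
    rw [List.getD_eq_getElem _ _ h1]
    have : (pre ++ "" :: suf)[pre.length + 1 + k] = suf[k] := by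
      rw [List.getElem_append_right (by omega)]
      have he : pre.length + 1 + k - pre.length = k + 1 := by omega
      simp only [he, List.getElem_cons_succ]
    rw [this, hkv]
  have h2 := hP.2 (pre.length + 1 + k) (by rw [List.mem_range]; omega)
    ⟨pre.length, by rw [List.mem_range]; omega, by
      rw [List.getD_eq_getElem _ _ (by omega)]
      rw [List.getElem_append_right (le_refl _)]
      simp⟩
  rw [hidx] at h2
  -- "".split(' -> ') = [''], length 1 ≠ 2
  exact absurd h2 (by decide)

theorem template_and_rules_eq (lines : List String)
    (hP : Pre_template_and_rules lines) :
    template_and_rules lines = template_and_rules_alt lines := by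
  unfold template_and_rules template_and_rules_alt
  by_cases hmem : "" ∈ lines
  · -- split lines at the first blank
    have hidx : ∃ k, PySem.List.index? lines "" = some k := by
      cases h : PySem.List.index? lines "" with
      | none => exact absurd hmem ((PySem.List.index?_eq_none_iff _ _).mp h)
      | some k => exact ⟨k, rfl⟩
    obtain ⟨k, hk⟩ := hidx
    obtain ⟨pre, suf, hsplit, _, hpre⟩ := ((PySem.List.index?_eq_some_iff _ _ _).mp hk)
    subst hsplit
    have hsuf : "" ∉ suf := pvNoBlankSuf pre suf hP
    have hcontains : (pre ++ "" :: suf).contains "" = true := by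
      simp
    rw [pvFoldTrue pre suf hpre, if_pos hcontains]
    have hrev : (pre ++ "" :: suf).reverse = suf.reverse ++ "" :: pre.reverse := by
      simp
    rw [hrev, pvCollect_eq _ _ (by simpa using hsuf), List.reverse_reverse]
  · -- no blank line at all: A's skip flag never drops, B's guard fails
    rw [if_neg (by simpa using hmem)]
    rw [pvFoldAllSkip lines hmem]

-- ===== VERDICT (by name: the statement is the Claim_ definition above) =====
theorem template_and_rules_spec : Claim_equal_template_and_rules := by
  intro lines _ hP
  unfold Spec_template_and_rules
  exact template_and_rules_eq lines hP
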